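-- pv_equiv track=rewrite | github.com/tlennon-ie/comfyui-model-compare | hierarchy_builder.py | calculate_row_header_spans
-- ===== SOURCE A (Python) =====
-- from typing import List, Dict, Any, Tuple, Optional, Set
--
-- def calculate_row_header_spans(
--     row_paths: List[Tuple],
--     row_hierarchy: List[str],
-- ) -> Dict[Tuple, Dict[int, int]]:
--     """
--     Calculate span for each row header cell.
--
--     Returns:
--         {
--             (path): {level: span_count}
--         }
--     """
--     spans = {}
--
--     for idx, path in enumerate(row_paths):
--         spans[path] = {}
--
--         # For each level, count consecutive rows with same value
--         for level in range(len(row_hierarchy)):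
--             # Count rows ahead with same value at this level
--             span = 1
--             for next_idx in range(idx + 1, len(row_paths)):
--                 next_path = row_paths[next_idx]
--                 if level < len(next_path) and level < len(path):
--                     if next_path[level] == path[level]:
--                         span += 1
--                     else:
--                         break
--
--             spans[path][level] = span
--
--     return spans
-- ===== SOURCE B (Python) =====
-- def calculate_row_header_spans(row_paths, row_hierarchy):
--     """Per-level backward pass: compute each run-length in O(1) from the
--     nearest longer-than-level row below, instead of rescanning ahead."""
--     n = len(row_paths)
--     cols = []
--     for level in range(len(row_hierarchy)):
--         col = [1] * n
--         nxt = None  # (value, span) of nearest row below with len > level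
--         for i in range(n - 1, -1, -1):
--             p = row_paths[i]
--             if level < len(p):
--                 v = p[level]
--                 s = nxt[1] + 1 if nxt is not None and nxt[0] == v else 1
--                 col[i] = s
--                 nxt = (v, s)
--         cols.append(col)
--     spans = {}
--     for i, path in enumerate(row_paths):
--         spans[path] = {level: cols[level][i] for level in range(len(row_hierarchy))}
--     return spans
-- ===== Notes on version B (the rewrite author's own statement) =====
-- stated objective: faster
-- what changed: Replaces the per-row forward rescan of all following rows with, per level, a single backward pass that derives each run-length in O(1) from the nearest long-enough row below.
import Mathlib
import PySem

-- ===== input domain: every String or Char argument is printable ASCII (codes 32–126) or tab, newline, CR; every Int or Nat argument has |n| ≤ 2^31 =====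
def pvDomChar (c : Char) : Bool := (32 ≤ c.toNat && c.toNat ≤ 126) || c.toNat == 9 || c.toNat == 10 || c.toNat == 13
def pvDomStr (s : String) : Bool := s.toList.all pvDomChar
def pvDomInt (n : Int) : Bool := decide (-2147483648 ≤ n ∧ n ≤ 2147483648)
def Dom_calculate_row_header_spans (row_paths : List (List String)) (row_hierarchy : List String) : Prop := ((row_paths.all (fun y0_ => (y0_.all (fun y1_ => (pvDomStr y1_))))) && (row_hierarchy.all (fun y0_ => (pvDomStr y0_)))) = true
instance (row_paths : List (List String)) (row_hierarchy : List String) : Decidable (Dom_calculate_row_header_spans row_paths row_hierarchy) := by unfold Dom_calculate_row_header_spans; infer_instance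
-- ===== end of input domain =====

-- B replaces A's per-row O(n) forward rescan by one backward pass per level (O(n*L) instead of O(n^2*L)); same return value.

-- ===== PORT A =====
-- inner loop 'for next_idx in range(idx+1, len(row_paths)): …' with break,
-- as structural recursion over the suffix row_paths[idx+1:]
def aSpanLoop (path : List String) (level : Nat) : List (List String) → Int → Int
  | [], span => span
  | next :: rest, span =>
    if level < next.length ∧ level < path.length then
      if next.getD level "" = path.getD level "" then aSpanLoop path level rest (span + 1)
      else span
    else aSpanLoop path level rest span

def calculate_row_header_spans (row_paths : List (List String)) (row_hierarchy : List String) : List (List String × List (Int × Int)) :=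
  (((PySem.List.enumerate row_paths).foldl
      (fun (spans : PySem.Dict (List String) (PySem.Dict Int Int)) p =>
        spans.insert p.2
          ((List.range row_hierarchy.length).foldl
            (fun (d : PySem.Dict Int Int) (level : Nat) =>
              d.insert (level : Int) (aSpanLoop p.2 level (row_paths.drop (p.1.toNat + 1)) 1))
            PySem.Dict.empty))
      PySem.Dict.empty).items).map (fun q => (q.1, q.2.items))

-- ===== PORT B =====
-- the backward index loop 'for i in range(n-1, -1, -1)', as structural recursion
-- from the tail: state = (nearest active row below as (value, span), column so far)
def bColAux (level : Nat) : List (List String) → Option (String × Int) × List Int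
  | [] => (none, [])
  | p :: rest =>
    let st := bColAux level rest
    if level < p.length then
      let v := p.getD level ""
      let s : Int := match st.1 with
        | some (v', s') => if v' = v then s' + 1 else 1
        | none => 1
      (some (v, s), s :: st.2)
    else (st.1, 1 :: st.2)

def calculate_row_header_spans_alt (row_paths : List (List String)) (row_hierarchy : List String) : List (List String × List (Int × Int)) :=
  let cols := (List.range row_hierarchy.length).map (fun level => (bColAux level row_paths).2)
  (((PySem.List.enumerate row_paths).foldl
      (fun (spans : PySem.Dict (List String) (PySem.Dict Int Int)) p =>
        spans.insert p.2
          ((List.range row_hierarchy.length).foldl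
            (fun (d : PySem.Dict Int Int) (level : Nat) =>
              d.insert (level : Int) ((cols.getD level []).getD p.1.toNat 1))
            PySem.Dict.empty))
      PySem.Dict.empty).items).map (fun q => (q.1, q.2.items))

-- ===== PRECONDITION & SPEC =====
def Spec_calculate_row_header_spans (row_paths : List (List String)) (row_hierarchy : List String) (out : List (List String × List (Int × Int))) : Prop := out = calculate_row_header_spans_alt row_paths row_hierarchy
instance (row_paths : List (List String)) (row_hierarchy : List String) (out : List (List String × List (Int × Int))) : Decidable (Spec_calculate_row_header_spans row_paths row_hierarchy out) := by unfold Spec_calculate_row_header_spans; infer_instance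

-- ===== CLAIM (what is proved, stated in full; the proofs are below) =====
def Claim_equal_calculate_row_header_spans : Prop := ∀ (row_paths : List (List String)) (row_hierarchy : List String), Dom_calculate_row_header_spans row_paths row_hierarchy → Spec_calculate_row_header_spans row_paths row_hierarchy (calculate_row_header_spans row_paths row_hierarchy)

-- ===== LEMMAS AND PROOFS =====

-- length of the matching run ahead of a row with value v at `level`,
-- skipping rows shorter than the level, stopping at the first long-enough mismatch
def tw (v : String) (level : Nat) : List (List String) → Int
  | [] => 0
  | q :: rest =>
    if level < q.length then
      (if q.getD level "" = v then 1 + tw v level rest else 0)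
    else tw v level rest

def spanF (p : List String) (level : Nat) (rest : List (List String)) : Int :=
  if level < p.length then 1 + tw (p.getD level "") level rest else 1

def nxtSpec (level : Nat) : List (List String) → Option (String × Int)
  | [] => none
  | p :: rest => if level < p.length then some (p.getD level "", spanF p level rest) else nxtSpec level rest

def colSpec (level : Nat) : List (List String) → List Int
  | [] => []
  | p :: rest => spanF p level rest :: colSpec level rest

lemma aSpanLoop_inactive (p : List String) (level : Nat) (h : ¬ level < p.length)
    (rest : List (List String)) (s : Int) : aSpanLoop p level rest s = s := by
  induction rest with
  | nil => rfl
  | cons q rest ih =>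
    simp only [aSpanLoop]
    rw [if_neg (by tauto)]
    exact ih

lemma aSpanLoop_active (p : List String) (level : Nat) (h : level < p.length)
    (rest : List (List String)) : ∀ s : Int,
    aSpanLoop p level rest s = s + tw (p.getD level "") level rest := by
  induction rest with
  | nil => intro s; simp [aSpanLoop, tw]
  | cons q rest ih =>
    intro s
    simp only [aSpanLoop, tw]
    by_cases hq : level < q.length
    · rw [if_pos ⟨hq, h⟩, if_pos hq]
      by_cases he : q.getD level "" = p.getD level ""
      · rw [if_pos he, ih, if_pos he]; ring
      · rw [if_neg he, if_neg he]; ring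
    · rw [if_neg (by tauto), if_neg hq, ih]

lemma aSpanLoop_eq_spanF (p : List String) (level : Nat) (rest : List (List String)) :
    aSpanLoop p level rest 1 = spanF p level rest := by
  unfold spanF
  by_cases h : level < p.length
  · rw [if_pos h, aSpanLoop_active p level h]
  · rw [if_neg h, aSpanLoop_inactive p level h]

lemma tw_via_nxt (level : Nat) (rest : List (List String)) (v : String) :
    (1 + tw v level rest : Int) = (match nxtSpec level rest with
      | some (v', s') => if v' = v then s' + 1 else 1
      | none => 1) := by
  induction rest with
  | nil => simp [tw, nxtSpec]
  | cons q rest ih =>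
    simp only [tw, nxtSpec]
    by_cases hq : level < q.length
    · rw [if_pos hq, if_pos hq]
      by_cases he : q.getD level "" = v
      · rw [if_pos he]
        simp only [he, spanF, if_pos hq]
        simp
        ring
      · rw [if_neg he]
        simp only [if_neg he]
        ring
    · rw [if_neg hq, if_neg hq, ih]

lemma bColAux_eq_spec (level : Nat) (rows : List (List String)) :
    bColAux level rows = (nxtSpec level rows, colSpec level rows) := by
  induction rows with
  | nil => rfl
  | cons p rest ih =>
    simp only [bColAux, colSpec, nxtSpec, ih]
    by_cases hp : level < p.length
    · rw [if_pos hp, if_pos hp]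
      have hs := (tw_via_nxt level rest (p.getD level "")).symm
      simp only [spanF, if_pos hp]
      exact congrArg (fun z => (some (p.getD level "", z), z :: colSpec level rest)) hs
    · rw [if_neg hp, if_neg hp]
      simp [spanF, hp]

lemma colSpec_getD (level : Nat) (rows : List (List String)) : ∀ (i : Nat) (h : i < rows.length),
    (colSpec level rows).getD i 1 = spanF (rows[i]'h) level (rows.drop (i + 1)) := by
  induction rows with
  | nil => intro i h; simp at h
  | cons p rest ih =>
    intro i h
    cases i with
    | zero =>
      simp only [colSpec, List.getD_cons_zero, List.getElem_cons_zero, List.drop_succ_cons,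
        List.drop_zero]
    | succ j =>
      simp only [colSpec, List.getD_cons_succ, List.getElem_cons_succ, List.drop_succ_cons]
      exact ih j (by simpa using h)

lemma mem_enumerate_spec {α : Type} (xs : List α) : ∀ (s : Int) (p : Int × α),
    p ∈ PySem.List.enumerate xs s →
    s ≤ p.1 ∧ ∃ h : (p.1 - s).toNat < xs.length, xs[(p.1 - s).toNat] = p.2 := by
  induction xs with
  | nil => intro s p hp; simp [PySem.List.enumerate_nil] at hp
  | cons x xs ih =>
    intro s p hp
    rw [PySem.List.enumerate_cons, List.mem_cons] at hp
    rcases hp with hp | hp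
    · subst hp
      exact ⟨le_refl _, by simp⟩
    · obtain ⟨h1, h2, h3⟩ := ih (s + 1) p hp
      have hm : (p.1 - s).toNat = (p.1 - (s + 1)).toNat + 1 := by omega
      refine ⟨by omega, by simp [hm]; omega, ?_⟩
      simp only [hm, List.getElem_cons_succ]
      exact h3

-- ===== VERDICT (by name: the statement is the Claim_ definition above) =====
theorem calculate_row_header_spans_spec : Claim_equal_calculate_row_header_spans := by
  intro rows hier _
  unfold Spec_calculate_row_header_spans
  unfold calculate_row_header_spans calculate_row_header_spans_alt
  simp only []
  congr 2
  apply PySem.List.foldl_congr_mem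
  intro acc p hp
  obtain ⟨h0, hlt, hget⟩ := mem_enumerate_spec rows 0 p hp
  simp only [Int.sub_zero] at hlt hget
  congr 1
  apply PySem.List.foldl_congr_mem
  intro d level hlevel
  have hlev : level < hier.length := List.mem_range.mp hlevel
  congr 1
  rw [aSpanLoop_eq_spanF]
  have hc : (List.map (fun l => (bColAux l rows).2) (List.range hier.length)).getD level []
      = (bColAux level rows).2 := by
    rw [List.getD_eq_getElem?_getD, List.getElem?_map, List.getElem?_range hlev]
    simp
  rw [hc, bColAux_eq_spec]
  simp only []
  rw [colSpec_getD level rows p.1.toNat hlt, hget]
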